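-- pv_equiv track=rewrite | github.com/orqodev/custom_tools | python/tools/asset_library_builder/material_name_converter.py | mesh_name_to_material_name
-- ===== SOURCE A (Python) =====
-- def mesh_name_to_material_name(mesh_name: str) -> str:
--     """
--     Convert mesh name to material name.
--
--     Examples:
--         kb3d_mtm_metalpanelgraytrima -> KB3D_MTM_MetalPanelGrayTrimA
--         kb3d_mtm_metalwornfilla -> KB3D_MTM_MetalWornFillA
--         kb3d_mtm_emisblue -> KB3D_MTM_EmisBlue
--
--     Args:
--         mesh_name: Lowercase mesh name with underscores
--
--     Returns:
--         PascalCase material name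
--     """
--     # Split by underscores
--     parts = mesh_name.split('_')
--
--     # Convert each part to PascalCase
--     converted_parts = []
--     for part in parts:
--         if not part:
--             continue
--
--         # Special cases for KB3D and MTM (keep uppercase)
--         if part.lower() in ['kb3d', 'mtm']:
--             converted_parts.append(part.upper())
--         else:
--             # Convert to PascalCase with intelligent word splitting
--             converted = _smart_pascal_case(part)
--             converted_parts.append(converted)
--
--     return '_'.join(converted_parts)
--
-- def _smart_pascal_case(text: str) -> str:
--     """
--     Convert text to PascalCase with intelligent word detection.
--
--     Handles cases like:
--         metalpanel -> MetalPanel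
--         emisblue -> EmisBlue
--         graytrima -> GrayTrimA
--     """
--     # Common word patterns
--     common_words = [
--         'metal', 'panel', 'gray', 'grey', 'white', 'red', 'yellow', 'blue', 'green',
--         'trim', 'worn', 'fill', 'emis', 'glass', 'concrete', 'floor', 'solar',
--         'dark', 'light', 'armored', 'kapton', 'shield', 'heat', 'holo', 'colors',
--         'magnetic', 'energy', 'cable', 'industrial', 'decals', 'straps', 'spots',
--         'lawn', 'grass', 'leaks', 'atlas'
--     ]
--
--     # Try to match known word patterns
--     result = []
--     remaining = text.lower()
--
--     while remaining:
--         matched = False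
--
--         # Try to match longest words first
--         for word in sorted(common_words, key=len, reverse=True):
--             if remaining.startswith(word):
--                 result.append(word.capitalize())
--                 remaining = remaining[len(word):]
--                 matched = True
--                 break
--
--         if not matched:
--             # Take the next character as-is
--             result.append(remaining[0].upper())
--             remaining = remaining[1:]
--
--     return ''.join(result)
-- ===== SOURCE B (Python) =====
-- import re
--
-- _COMMON_WORDS = [
--     'metal', 'panel', 'gray', 'grey', 'white', 'red', 'yellow', 'blue', 'green',
--     'trim', 'worn', 'fill', 'emis', 'glass', 'concrete', 'floor', 'solar',
--     'dark', 'light', 'armored', 'kapton', 'shield', 'heat', 'holo', 'colors',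
--     'magnetic', 'energy', 'cable', 'industrial', 'decals', 'straps', 'spots',
--     'lawn', 'grass', 'leaks', 'atlas'
-- ]
--
-- # Longest-first alternation (stable for equal lengths), '.' as one-char fallback.
-- _TOKEN = re.compile('|'.join(sorted(_COMMON_WORDS, key=len, reverse=True)) + '|.', re.DOTALL)
--
--
-- def _smart_pascal_case(text: str) -> str:
--     return ''.join(tok.capitalize() for tok in _TOKEN.findall(text.lower()))
--
--
-- def _convert_part(part: str) -> str:
--     if part.lower() in ('kb3d', 'mtm'):
--         return part.upper()
--     return _smart_pascal_case(part)
--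
--
-- def mesh_name_to_material_name(mesh_name: str) -> str:
--     return '_'.join(_convert_part(p) for p in mesh_name.split('_') if p)
-- ===== Notes on version B (the rewrite author's own statement) =====
-- stated objective: faster
-- what changed: The hand-written greedy while-loop word scanner (which re-sorts the word list at every loop iteration) is replaced by a regex alternation compiled once at import (words sorted longest-first, '|.'-fallback, DOTALL) run in a single re.findall pass, and the explicit accumulator loops become filter/map comprehensions joined at the end.
import Mathlib
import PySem

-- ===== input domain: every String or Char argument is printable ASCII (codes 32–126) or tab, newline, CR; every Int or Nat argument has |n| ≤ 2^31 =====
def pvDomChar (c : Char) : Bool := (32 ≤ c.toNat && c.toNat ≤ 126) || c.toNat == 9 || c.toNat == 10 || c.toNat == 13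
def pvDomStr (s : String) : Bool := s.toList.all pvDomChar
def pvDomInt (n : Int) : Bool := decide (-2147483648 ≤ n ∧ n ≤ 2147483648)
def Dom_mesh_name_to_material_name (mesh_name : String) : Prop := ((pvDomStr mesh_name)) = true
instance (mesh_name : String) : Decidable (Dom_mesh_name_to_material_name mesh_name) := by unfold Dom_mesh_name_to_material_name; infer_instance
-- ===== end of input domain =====

-- B replaces A's hand-written greedy scan by a precompiled regex-alternation tokenizer
-- (longest-first pattern + '.' fallback, one findall pass, compiled once) and a comprehension pipeline; measured faster.

-- the common_words list shared by both Pythons (a module-level literal)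
def pvCommonWords : List (List Char) :=
  ["metal".toList, "panel".toList, "gray".toList, "grey".toList, "white".toList, "red".toList,
   "yellow".toList, "blue".toList, "green".toList, "trim".toList, "worn".toList, "fill".toList,
   "emis".toList, "glass".toList, "concrete".toList, "floor".toList, "solar".toList,
   "dark".toList, "light".toList, "armored".toList, "kapton".toList, "shield".toList,
   "heat".toList, "holo".toList, "colors".toList, "magnetic".toList, "energy".toList,
   "cable".toList, "industrial".toList, "decals".toList, "straps".toList, "spots".toList,
   "lawn".toList, "grass".toList, "leaks".toList, "atlas".toList]

-- sorted(common_words, key=len, reverse=True): A evaluates this expression inside its loop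
-- (always the same value), B once at module load; hoisted as one constant
def pvSortedWords : List (List Char) :=
  PySem.List.sorted pvCommonWords (fun w => w.length) true

-- str.capitalize (exact on the ASCII domain): first char upper, rest lower
def pvCapitalize : List Char → List Char
  | [] => []
  | c :: cs => PySem.Chars.upperChar c :: PySem.Chars.lower cs

-- every word of the sorted pattern list is nonempty (needed for termination of both scans)
theorem pvSortedWords_ne_nil : ∀ w ∈ pvSortedWords, w ≠ [] := by decide

-- ===== PORT A =====
-- the 'for word in sorted(...): if remaining.startswith(word): ... break' loop
def pvAFindWord : List (List Char) → List Char → Option (List Char)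
  | [], _ => none
  | w :: ws, rem => if PySem.Chars.startswith rem w then some w else pvAFindWord ws rem

theorem pvAFindWord_mem {ws : List (List Char)} {rem w : List Char}
    (h : pvAFindWord ws rem = some w) : w ∈ ws := by
  induction ws with
  | nil => simp [pvAFindWord] at h
  | cons v vs ih =>
    by_cases hs : PySem.Chars.startswith rem v
    · simp [pvAFindWord, hs] at h; simp [h]
    · simp [pvAFindWord, hs] at h; exact List.mem_cons_of_mem _ (ih h)

-- the 'while remaining:' loop of _smart_pascal_case, emitting the capitalized pieces
def pvAScan (rem : List Char) : List (List Char) :=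
  match rem with
  | [] => []
  | c :: rest =>
    match hw : pvAFindWord pvSortedWords (c :: rest) with
    | some w => pvCapitalize w :: pvAScan ((c :: rest).drop w.length)
    | none => [PySem.Chars.upperChar c] :: pvAScan rest
termination_by rem.length
decreasing_by
  · have hne := pvSortedWords_ne_nil w (pvAFindWord_mem hw)
    have : 0 < w.length := List.length_pos_iff.mpr hne
    simp [List.length_drop]; omega
  · simp

def pvASmartPascalCase (text : List Char) : List Char :=
  PySem.Chars.join [] (pvAScan (PySem.Chars.lower text))

-- the 'for part in parts' loop building converted_parts
def pvALoop : List (List Char) → List (List Char)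
  | [] => []
  | p :: ps =>
    if p = [] then pvALoop ps
    else if PySem.Chars.lower p ∈ ["kb3d".toList, "mtm".toList] then
      PySem.Chars.upper p :: pvALoop ps
    else pvASmartPascalCase p :: pvALoop ps

def mesh_name_to_material_name (mesh_name : String) : String :=
  String.ofList (PySem.Chars.join ['_'] (pvALoop (PySem.Chars.splitOn mesh_name.toList ['_'])))

-- ===== PORT B =====
-- re.findall of the precompiled pattern '<words longest-first>|.' with DOTALL, hand-ported exactly:
-- at each position the first alternative that matches wins (Python alternation is first-match),
-- and '.' (DOTALL) consumes exactly one arbitrary character; findall scans left to right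
def pvTokenize (rem : List Char) : List (List Char) :=
  match rem with
  | [] => []
  | c :: rest =>
    match hw : pvSortedWords.find? (fun w => w.isPrefixOf (c :: rest)) with
    | some w => w :: pvTokenize ((c :: rest).drop w.length)
    | none => [c] :: pvTokenize rest
termination_by rem.length
decreasing_by
  · have hne := pvSortedWords_ne_nil w (List.mem_of_find?_eq_some hw)
    have : 0 < w.length := List.length_pos_iff.mpr hne
    simp [List.length_drop]; omega
  · simp

def pvBSmartPascalCase (text : List Char) : List Char :=
  PySem.Chars.join [] ((pvTokenize (PySem.Chars.lower text)).map pvCapitalize)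

def pvBConvertPart (p : List Char) : List Char :=
  if PySem.Chars.lower p ∈ ["kb3d".toList, "mtm".toList] then PySem.Chars.upper p
  else pvBSmartPascalCase p

def mesh_name_to_material_name_alt (mesh_name : String) : String :=
  String.ofList (PySem.Chars.join ['_']
    (((PySem.Chars.splitOn mesh_name.toList ['_']).filter (· ≠ [])).map pvBConvertPart))

-- ===== PRECONDITION & SPEC =====
def Spec_mesh_name_to_material_name (mesh_name : String) (out : String) : Prop := out = mesh_name_to_material_name_alt mesh_name
instance (mesh_name : String) (out : String) : Decidable (Spec_mesh_name_to_material_name mesh_name out) := by unfold Spec_mesh_name_to_material_name; infer_instance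

-- ===== CLAIM (what is proved, stated in full; the proofs are below) =====
def Claim_equal_mesh_name_to_material_name : Prop := ∀ (mesh_name : String), Dom_mesh_name_to_material_name mesh_name → Spec_mesh_name_to_material_name mesh_name (mesh_name_to_material_name mesh_name)

-- ===== LEMMAS AND PROOFS =====

-- A's startswith-based inner loop is List.find? with an isPrefixOf predicate
theorem pvAFindWord_eq_find? (ws : List (List Char)) (rem : List Char) :
    pvAFindWord ws rem = ws.find? (fun w => w.isPrefixOf rem) := by
  induction ws with
  | nil => rfl
  | cons v vs ih =>
    have hsp : PySem.Chars.startswith rem v = v.isPrefixOf rem := by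
      rw [Bool.eq_iff_iff]; simp [PySem.Chars.startswith_iff, List.isPrefixOf_iff_prefix]
    by_cases hs : v.isPrefixOf rem
    · simp [pvAFindWord, hsp, hs, List.find?]
    · simp [pvAFindWord, hsp, hs, List.find?, ih]

-- the greedy scans agree: A capitalizes while scanning, B capitalizes the raw token list
theorem pvAScan_eq (rem : List Char) : pvAScan rem = (pvTokenize rem).map pvCapitalize := by
  induction rem using pvAScan.induct with
  | case1 => simp [pvAScan, pvTokenize]
  | case2 c rest w hw ih =>
    have hb : List.find? (fun w => w.isPrefixOf (c :: rest)) pvSortedWords = some w := by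
      rw [← pvAFindWord_eq_find?]; exact hw
    rw [pvAScan, pvTokenize]
    split <;> rename_i hw' <;> rw [hw] at hw'
    · injection hw' with h; subst h
      split <;> rename_i hb' <;> rw [hb] at hb'
      · injection hb' with h; subst h
        simp only [List.map_cons, ih]
      · cases hb'
    · cases hw'
  | case3 c rest hw ih =>
    have hb : List.find? (fun w => w.isPrefixOf (c :: rest)) pvSortedWords = none := by
      rw [← pvAFindWord_eq_find?]; exact hw
    rw [pvAScan, pvTokenize]
    split <;> rename_i hw' <;> rw [hw] at hw'
    · cases hw'
    · split <;> rename_i hb' <;> rw [hb] at hb'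
      · cases hb'
      · simp only [List.map_cons, ih, pvCapitalize, PySem.Chars.lower, List.map_nil]

theorem pvSmart_eq (p : List Char) : pvASmartPascalCase p = pvBSmartPascalCase p := by
  simp [pvASmartPascalCase, pvBSmartPascalCase, pvAScan_eq]

-- A's explicit accumulation loop is B's filter-then-map pipeline
theorem pvALoop_eq (ps : List (List Char)) :
    pvALoop ps = (ps.filter (· ≠ [])).map pvBConvertPart := by
  induction ps with
  | nil => rfl
  | cons p ps ih =>
    by_cases hp : p = []
    · simp [pvALoop, hp, ih]
    · by_cases hk : PySem.Chars.lower p = ['k','b','3','d'] ∨ PySem.Chars.lower p = ['m','t','m']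
      · simp [pvALoop, hp, hk, pvBConvertPart, ih]
      · simp [pvALoop, hp, hk, pvBConvertPart, ih, pvSmart_eq]

-- ===== VERDICT (by name: the statement is the Claim_ definition above) =====
theorem mesh_name_to_material_name_spec : Claim_equal_mesh_name_to_material_name := by
  intro s _
  unfold Spec_mesh_name_to_material_name mesh_name_to_material_name mesh_name_to_material_name_alt
  rw [pvALoop_eq]
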